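-- pv_equiv track=rewrite | github.com/nconsigny/SPHINCs- | script/sweep_d2_fluhrer_dang.py | octopus_auth_nodes_count
-- ===== SOURCE A (Python) =====
-- def octopus_auth_nodes_count(sorted_indices: list[int], tree_height: int) -> int:
--     """Count Octopus auth nodes for sorted unique indices."""
--     current = list(sorted_indices)
--     count = 0
--     for _ in range(tree_height):
--         nxt: list[int] = []
--         j = 0
--         while j < len(current):
--             idx = current[j]
--             sibling = idx ^ 1
--             if j + 1 < len(current) and current[j + 1] == sibling:
--                 nxt.append(idx >> 1)
--                 j += 2
--             else:
--                 count += 1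
--                 nxt.append(idx >> 1)
--                 j += 1
--         current = nxt
--     return count
-- ===== SOURCE B (Python) =====
-- def octopus_auth_nodes_count(sorted_indices: list[int], tree_height: int) -> int:
--     """Count Octopus auth nodes for sorted unique indices.
--
--     Closed form, no level simulation: each level contributes 1 (the lone
--     survivor baseline) plus, per adjacent pair, 1 while their prefixes are
--     still distinct minus 2 once (when they merge within the tree).  The
--     merge level of an adjacent pair is the bit length of their xor
--     (infinite when the signs differ), so the whole count is a single pass
--     over adjacent pairs.
--     """
--     if tree_height <= 0 or not sorted_indices:
--         return 0
--     total = tree_height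
--     for a, b in zip(sorted_indices, sorted_indices[1:]):
--         x = a ^ b
--         if x < 0:
--             total += tree_height          # signs differ: prefixes never merge
--         else:
--             t = x.bit_length()            # first level where the prefixes agree
--             if t > tree_height:
--                 total += tree_height
--             else:
--                 total += t - 2
--     return total
-- ===== Notes on version B (the rewrite author's own statement) =====
-- stated objective: alternative
-- what changed: Replaces A's level-by-level sibling-pairing simulation (tree_height passes rebuilding the frontier) by a single pass over adjacent pairs: a pair's merge level is the bit length of the xor of its two indices (infinite when the signs differ), and its summed contribution over all levels is a closed form (t-2 if t <= h, else h) added to the h baseline nodes of the lone surviving path; …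
-- outside the precondition, e.g. on octopus_auth_nodes_count([0, 1, 0], 1): A returns 1, B returns -1; on octopus_auth_nodes_count([0, 0], 1): A returns 2, B returns -1
import Mathlib
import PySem

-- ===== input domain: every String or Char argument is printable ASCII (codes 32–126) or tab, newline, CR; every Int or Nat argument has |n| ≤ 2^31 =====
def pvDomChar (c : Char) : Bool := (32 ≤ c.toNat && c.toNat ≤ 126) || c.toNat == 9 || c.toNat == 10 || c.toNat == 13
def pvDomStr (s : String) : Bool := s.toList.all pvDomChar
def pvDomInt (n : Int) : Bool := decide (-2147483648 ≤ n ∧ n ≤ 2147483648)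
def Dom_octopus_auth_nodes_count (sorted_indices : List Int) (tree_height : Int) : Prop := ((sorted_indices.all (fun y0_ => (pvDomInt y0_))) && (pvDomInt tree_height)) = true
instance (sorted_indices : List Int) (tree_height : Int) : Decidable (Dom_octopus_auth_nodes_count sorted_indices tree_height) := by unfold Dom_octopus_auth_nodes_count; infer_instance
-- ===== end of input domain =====

-- B replaces A's level-by-level sibling-pairing simulation by a single pass over adjacent
-- pairs: each pair's merge level is the bit length of the xor of its two indices, and its
-- total contribution over all tree_height levels is a closed form.

-- ===== PORT A =====
-- one pass of A's inner `while j < len(current)` loop: (next level, auth count of this level)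
def pvALevel : List Int → List Int × Int
  | [] => ([], 0)
  | idx :: rest =>
    match rest with
    | [] => ([idx >>> (1:Nat)], 1)
    | nxt :: rest2 =>
      if nxt = PySem.Int.bxor idx 1 then
        let r := pvALevel rest2
        (idx >>> (1:Nat) :: r.1, r.2)
      else
        let r := pvALevel (nxt :: rest2)
        (idx >>> (1:Nat) :: r.1, r.2 + 1)

def octopus_auth_nodes_count (sorted_indices : List Int) (tree_height : Int) : Int :=
  ((PySem.List.pyRange 0 tree_height 1).foldl
    (fun st _ => let lc := pvALevel st.1; (lc.1, st.2 + lc.2))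
    (sorted_indices, (0 : Int))).2

-- ===== PORT B =====
-- Source B's single pass over zip(sorted_indices, sorted_indices[1:])
def octopus_auth_nodes_count_alt (sorted_indices : List Int) (tree_height : Int) : Int :=
  if tree_height ≤ 0 ∨ sorted_indices = [] then 0
  else
    (sorted_indices.zip (sorted_indices.drop 1)).foldl
      (fun total ab =>
        let x := PySem.Int.bxor ab.1 ab.2
        if x < 0 then total + tree_height
        else
          if ((PySem.Int.bitLength x : Nat) : Int) > tree_height then total + tree_height
          else total + (((PySem.Int.bitLength x : Nat) : Int) - 2))
      tree_height

-- ===== PRECONDITION & SPEC =====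
-- Pre_ restricts to the function's documented domain ("sorted unique indices", either
-- direction) and to non-positive heights (no levels, both sides trivially 0); on unsorted or
-- duplicate input at positive height A's greedy pairing walk returns accidental counts.
def Pre_octopus_auth_nodes_count (sorted_indices : List Int) (tree_height : Int) : Prop :=
  tree_height ≤ 0 ∨ List.IsChain (· < ·) sorted_indices ∨ List.IsChain (· > ·) sorted_indices
instance (sorted_indices : List Int) (tree_height : Int) : Decidable (Pre_octopus_auth_nodes_count sorted_indices tree_height) := by unfold Pre_octopus_auth_nodes_count; infer_instance

def pvWitness_octopus_auth_nodes_count : List Int × Int := ([0, 1, 4, 7], 3)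

def Spec_octopus_auth_nodes_count (sorted_indices : List Int) (tree_height : Int) (out : Int) : Prop := out = octopus_auth_nodes_count_alt sorted_indices tree_height
instance (sorted_indices : List Int) (tree_height : Int) (out : Int) : Decidable (Spec_octopus_auth_nodes_count sorted_indices tree_height out) := by unfold Spec_octopus_auth_nodes_count; infer_instance

-- ===== CLAIM =====
def Claim_equal_octopus_auth_nodes_count : Prop := ∀ (sorted_indices : List Int) (tree_height : Int), Dom_octopus_auth_nodes_count sorted_indices tree_height → Pre_octopus_auth_nodes_count sorted_indices tree_height → Spec_octopus_auth_nodes_count sorted_indices tree_height (octopus_auth_nodes_count sorted_indices tree_height)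

-- ===== LEMMAS AND PROOFS =====

-- ---- generic Int bit facts ----

-- x >> 1 is flooring halving
theorem pv_half (x : Int) : x = 2 * (x >>> (1:Nat)) + x % 2 := by
  cases x with
  | ofNat n =>
      show (Int.ofNat n) = 2 * (Int.ofNat (n >>> 1)) + _
      simp only [Nat.shiftRight_succ, Nat.shiftRight_zero, Int.ofNat_eq_natCast]
      omega
  | negSucc n =>
      show (Int.negSucc n) = 2 * (Int.negSucc (n >>> 1)) + _
      simp only [Nat.shiftRight_succ, Nat.shiftRight_zero, Int.negSucc_eq]
      omega

-- magnitude map: M x = x for x ≥ 0, the two's-complement payload -x-1 otherwise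
def pvM (x : Int) : Nat := if 0 ≤ x then x.toNat else (-x - 1).toNat

theorem pv_ext {a b : Int} (hs : 0 ≤ a ↔ 0 ≤ b) (hm : pvM a = pvM b) : a = b := by
  unfold pvM at hm
  by_cases ha : 0 ≤ a
  · rw [if_pos ha, if_pos (hs.mp ha)] at hm; omega
  · rw [if_neg ha, if_neg (fun hb => ha (hs.mpr hb))] at hm; omega

theorem pv_shift_sign (x : Int) : 0 ≤ x ↔ 0 ≤ x >>> (1:Nat) := by
  have := pv_half x; omega

theorem pv_shift_M (x : Int) : pvM (x >>> (1:Nat)) = pvM x / 2 := by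
  unfold pvM
  have h := pv_half x
  have hs := pv_shift_sign x
  by_cases hx : 0 ≤ x
  · rw [if_pos hx, if_pos (hs.mp hx)]; omega
  · rw [if_neg hx, if_neg (fun hb => hx (hs.mpr hb))]; omega

theorem pv_shift_mono {a b : Int} (h : a < b) : a >>> (1:Nat) ≤ b >>> (1:Nat) := by
  have ha := pv_half a; have hb := pv_half b; omega

theorem pv_bxor_same {a b : Int} (hs : 0 ≤ a ↔ 0 ≤ b) :
    PySem.Int.bxor a b = ((pvM a ^^^ pvM b : Nat) : Int) := by
  unfold PySem.Int.bxor pvM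
  by_cases ha : 0 ≤ a
  · rw [if_pos ha, if_pos (hs.mp ha), if_pos ha, if_pos (hs.mp ha)]
  · rw [if_neg ha, if_neg (fun hb => ha (hs.mpr hb)), if_neg ha,
      if_neg (fun hb => ha (hs.mpr hb))]

theorem pv_bxor_mixed {a b : Int} (hs : ¬ (0 ≤ a ↔ 0 ≤ b)) :
    PySem.Int.bxor a b < 0 := by
  unfold PySem.Int.bxor
  by_cases ha : 0 ≤ a
  · have hb : ¬ 0 ≤ b := by tauto
    rw [if_pos ha, if_neg hb]; omega
  · have hb : 0 ≤ b := by tauto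
    rw [if_neg ha, if_pos hb]; omega

theorem pv_bxor_one (a : Int) :
    (0 ≤ PySem.Int.bxor a 1 ↔ 0 ≤ a) ∧ pvM (PySem.Int.bxor a 1) = pvM a ^^^ 1 := by
  unfold PySem.Int.bxor pvM
  by_cases ha : 0 ≤ a
  · rw [if_pos ha, if_pos (by norm_num : (0:Int) ≤ 1)]
    constructor
    · constructor <;> intro <;> omega
    · rw [if_pos (by positivity), if_pos ha]
      simp
  · rw [if_neg ha, if_pos (by norm_num : (0:Int) ≤ 1)]
    constructor
    · constructor <;> intro <;> omega
    · rw [if_neg (by omega), if_neg ha]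
      have h2 : (-(-(((-a - 1).toNat ^^^ (1:Int).toNat : Nat) : Int) - 1) - 1)
          = (((-a - 1).toNat ^^^ (1:Int).toNat : Nat) : Int) := by ring
      rw [h2]
      simp

-- bit length of a Nat, through the PySem primitive
def pvBL (u : Nat) : Nat := PySem.Int.bitLength ((u : Nat) : Int)

theorem pv_bl_rec {u : Nat} (hu : 0 < u) : pvBL u = pvBL (u / 2) + 1 :=
  PySem.Int.bitLength_natCast hu

theorem pv_bl_pos {u : Nat} (hu : 0 < u) : 1 ≤ pvBL u := by
  rw [pv_bl_rec hu]; omega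

theorem pv_bl_one : pvBL 1 = 1 := by decide

-- ---- B's per-pair contribution and pair sum ----
def pvG (hh a b : Int) : Int :=
  if PySem.Int.bxor a b < 0 then hh
  else if ((PySem.Int.bitLength (PySem.Int.bxor a b) : Nat) : Int) > hh then hh
  else ((PySem.Int.bitLength (PySem.Int.bxor a b) : Nat) : Int) - 2

def pvPS (hh : Int) : List Int → Int
  | a :: b :: r => pvG hh a b + pvPS hh (b :: r)
  | _ => 0

-- B's fold over zip equals the pair sum
theorem pv_fold_ps (hh : Int) : ∀ (si : List Int) (acc : Int),
    ((si.zip (si.drop 1)).foldl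
      (fun total ab =>
        let x := PySem.Int.bxor ab.1 ab.2
        if x < 0 then total + hh
        else
          if ((PySem.Int.bitLength x : Nat) : Int) > hh then total + hh
          else total + (((PySem.Int.bitLength x : Nat) : Int) - 2))
      acc)
    = acc + pvPS hh si := by
  intro si
  induction si with
  | nil => intro acc; simp [pvPS]
  | cons a t ih =>
      intro acc
      cases t with
      | nil => simp [pvPS]
      | cons b r =>
          simp only [List.drop_succ_cons, List.drop_zero, List.zip_cons_cons, List.foldl_cons]
          have h2 := ih (acc := if PySem.Int.bxor a b < 0 then acc + hh
            else if ((PySem.Int.bitLength (PySem.Int.bxor a b) : Nat) : Int) > hh then acc + hh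
            else acc + (((PySem.Int.bitLength (PySem.Int.bxor a b) : Nat) : Int) - 2))
          simp only [List.drop_succ_cons, List.drop_zero] at h2 ⊢
          rw [h2]
          show _ = acc + (pvG hh a b + pvPS hh (b :: r))
          unfold pvG
          split_ifs <;> ring

-- pvG through the magnitudes, by sign pattern
theorem pvG_same {a b : Int} (hs : 0 ≤ a ↔ 0 ≤ b) (hh : Int) :
    pvG hh a b = if ((pvBL (pvM a ^^^ pvM b) : Nat) : Int) > hh then hh
      else ((pvBL (pvM a ^^^ pvM b) : Nat) : Int) - 2 := by
  unfold pvG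
  rw [pv_bxor_same hs, if_neg (by omega)]
  rfl

theorem pvG_mixed {a b : Int} (hs : ¬ (0 ≤ a ↔ 0 ≤ b)) (hh : Int) :
    pvG hh a b = hh := by
  unfold pvG
  rw [if_pos (pv_bxor_mixed hs)]

-- ---- per-pair lemmas ----

-- a sibling pair (y = x ^ 1) shifts to equal parents and contributes -1 at any height ≥ 1
theorem pv_pair_sib {x y : Int} (hy : y = PySem.Int.bxor x 1) :
    x >>> (1:Nat) = y >>> (1:Nat) ∧ ∀ hh : Int, 1 ≤ hh → pvG hh x y = -1 := by
  obtain ⟨hsgn, hM⟩ := pv_bxor_one x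
  have hs : 0 ≤ x ↔ 0 ≤ y := by rw [hy]; exact hsgn.symm
  have hxor : pvM x ^^^ pvM y = 1 := by
    rw [hy, hM, ← Nat.xor_assoc, Nat.xor_self, Nat.zero_xor]
  constructor
  · apply pv_ext
    · rw [← pv_shift_sign, ← pv_shift_sign]; exact hs
    · rw [pv_shift_M, pv_shift_M]
      have hdiv := Nat.xor_div_two (a := pvM x) (b := pvM y)
      rw [hxor] at hdiv
      norm_num at hdiv
      exact Nat.xor_eq_zero_iff.mp hdiv.symm
  · intro hh hhh
    rw [pvG_same hs, hxor, pv_bl_one, if_neg (by omega)]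
    omega

-- a non-sibling adjacent pair: strictly increasing parents, and its contribution at
-- height hh+1 splits as (contribution at height 1) + (shifted pair's contribution at hh)
theorem pv_pair_step {x y : Int} (hnexy : x ≠ y) (hns : y ≠ PySem.Int.bxor x 1) :
    x >>> (1:Nat) ≠ y >>> (1:Nat) ∧ pvG 1 x y = 1 ∧
    ∀ hh : Int, pvG hh (x >>> (1:Nat)) (y >>> (1:Nat)) = pvG (hh + 1) x y - pvG 1 x y := by
  by_cases hs : 0 ≤ x ↔ 0 ≤ y
  · -- same sign: work through the magnitudes
    set u := pvM x ^^^ pvM y with hu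
    have hne : x ≠ y := hnexy
    have hu0 : u ≠ 0 := fun h => hne (pv_ext hs (Nat.xor_eq_zero_iff.mp h))
    have hu1 : u ≠ 1 := by
      intro h1
      apply hns
      obtain ⟨hsgn, hM⟩ := pv_bxor_one x
      refine pv_ext (by tauto) ?_
      rw [hM]
      have hyx : pvM y = pvM x ^^^ (pvM x ^^^ pvM y) := by
        rw [← Nat.xor_assoc, Nat.xor_self, Nat.zero_xor]
      rw [hyx, ← hu, h1]
    have hu2 : 2 ≤ u := by omega
    have hs' : 0 ≤ x >>> (1:Nat) ↔ 0 ≤ y >>> (1:Nat) := by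
      rw [← pv_shift_sign, ← pv_shift_sign]; exact hs
    have hMxor : pvM (x >>> (1:Nat)) ^^^ pvM (y >>> (1:Nat)) = u / 2 := by
      rw [pv_shift_M, pv_shift_M, hu, ← Nat.xor_div_two]
    have hlt' : x >>> (1:Nat) ≠ y >>> (1:Nat) := by
      intro h
      rw [h, Nat.xor_self] at hMxor
      omega
    have hbl : pvBL u = pvBL (u / 2) + 1 := pv_bl_rec (by omega)
    have hblp : 1 ≤ pvBL (u / 2) := pv_bl_pos (by omega)
    refine ⟨hlt', ?_, ?_⟩
    · rw [pvG_same hs 1, ← hu, if_pos (by omega)]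
    · intro hh
      rw [pvG_same hs' hh, hMxor, pvG_same hs (hh + 1), pvG_same hs 1, ← hu, hbl]
      split_ifs <;> omega
  · -- mixed signs: the pair never merges, at any level
    have hs' : ¬ (0 ≤ x >>> (1:Nat) ↔ 0 ≤ y >>> (1:Nat)) := by
      rw [← pv_shift_sign, ← pv_shift_sign]; exact hs
    have hlt' : x >>> (1:Nat) ≠ y >>> (1:Nat) := by
      intro h; rw [h] at hs'; exact hs' Iff.rfl
    refine ⟨hlt', pvG_mixed hs 1, fun hh => ?_⟩
    rw [pvG_mixed hs' hh, pvG_mixed hs (hh + 1), pvG_mixed hs 1]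
    ring

-- for the sibling case of A's walk: the element after the sibling is not x's grand-sibling
theorem pv_not_sib_of_gt {x z : Int} (hxz : z ≠ x) :
    z ≠ PySem.Int.bxor (PySem.Int.bxor x 1) 1 := by
  intro hz
  obtain ⟨hs1, hM1⟩ := pv_bxor_one x
  obtain ⟨hs2, hM2⟩ := pv_bxor_one (PySem.Int.bxor x 1)
  have hzx : z = x := by
    rw [hz]
    refine pv_ext (by tauto) ?_
    rw [hM2, hM1, Nat.xor_assoc, Nat.xor_self, Nat.xor_zero]
  exact hxz hzx

-- the first element of a level's output is the first input's parent
theorem pv_level_head (x : Int) (r : List Int) :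
    ∃ tl, (pvALevel (x :: r)).1 = x >>> (1:Nat) :: tl := by
  cases r with
  | nil => exact ⟨[], rfl⟩
  | cons y r2 =>
      by_cases h : y = PySem.Int.bxor x 1
      · exact ⟨(pvALevel r2).1, by simp [pvALevel, h]⟩
      · exact ⟨(pvALevel (y :: r2)).1, by simp [pvALevel, h]⟩

-- A's per-level count is 1 + the height-1 pair sum
theorem pv_count_eq (R : Int → Int → Prop) (htr : ∀ a b c : Int, R a b → R b c → R a c)
    (hirr : ∀ a b : Int, R a b → a ≠ b) :
    ∀ c : List Int, List.IsChain R c → c ≠ [] →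
    (pvALevel c).2 = 1 + pvPS 1 c := by
  intro c
  induction c using pvALevel.induct with
  | case1 => intro _ h; exact absurd rfl h
  | case2 x => intro _ _; simp [pvALevel, pvPS]
  | case3 x rest2 ih =>
      intro hch _
      rw [List.isChain_cons_cons] at hch
      obtain ⟨hsib_eq, hg⟩ := pv_pair_sib (x := x) (y := PySem.Int.bxor x 1) rfl
      have hgx : pvG 1 x (PySem.Int.bxor x 1) = -1 := hg 1 (by norm_num)
      cases rest2 with
      | nil =>
          show (pvALevel [x, PySem.Int.bxor x 1]).2 = _
          simp [pvALevel, pvPS, hgx]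
      | cons z r' =>
          rw [List.isChain_cons_cons] at hch
          have hzns := pv_not_sib_of_gt (Ne.symm (hirr _ _ (htr _ _ _ hch.1 hch.2.1)))
          show (pvALevel (x :: PySem.Int.bxor x 1 :: z :: r')).2 = _
          rw [show (pvALevel (x :: PySem.Int.bxor x 1 :: z :: r')).2
              = (pvALevel (z :: r')).2 by simp [pvALevel]]
          rw [ih hch.2.2 (by simp)]
          show _ = 1 + (pvG 1 x (PySem.Int.bxor x 1) + (pvG 1 (PySem.Int.bxor x 1) z + pvPS 1 (z :: r')))
          have hg1 := (pv_pair_step (hirr _ _ hch.2.1) hzns).2.1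
          rw [hgx, hg1]
          ring
  | case4 x y rest2 hne ih =>
      intro hch _
      rw [List.isChain_cons_cons] at hch
      have hg1 := (pv_pair_step (hirr _ _ hch.1) hne).2.1
      show (pvALevel (x :: y :: rest2)).2 = _
      rw [show (pvALevel (x :: y :: rest2)).2 = (pvALevel (y :: rest2)).2 + 1 by
        simp [pvALevel, hne]]
      rw [ih hch.2 (by simp)]
      show _ = 1 + (pvG 1 x y + pvPS 1 (y :: rest2))
      rw [hg1]
      ring

-- A's level output is strictly increasing again
theorem pv_level_sorted (R : Int → Int → Prop) (htr : ∀ a b c : Int, R a b → R b c → R a c)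
    (hirr : ∀ a b : Int, R a b → a ≠ b)
    (hsh : ∀ a b : Int, R a b → a >>> (1:Nat) ≠ b >>> (1:Nat) → R (a >>> (1:Nat)) (b >>> (1:Nat))) :
    ∀ c : List Int, List.IsChain R c →
    List.IsChain R (pvALevel c).1 := by
  intro c
  induction c using pvALevel.induct with
  | case1 => intro _; simp [pvALevel]
  | case2 x => intro _; simp [pvALevel]
  | case3 x rest2 ih =>
      intro hch
      rw [List.isChain_cons_cons] at hch
      obtain ⟨hsib_eq, _⟩ := pv_pair_sib (x := x) (y := PySem.Int.bxor x 1) rfl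
      show List.IsChain R (pvALevel (x :: PySem.Int.bxor x 1 :: rest2)).1
      rw [show (pvALevel (x :: PySem.Int.bxor x 1 :: rest2)).1
          = x >>> (1:Nat) :: (pvALevel rest2).1 by simp [pvALevel]]
      cases rest2 with
      | nil => simp [pvALevel]
      | cons z r' =>
          rw [List.isChain_cons_cons] at hch
          have hzns := pv_not_sib_of_gt (Ne.symm (hirr _ _ (htr _ _ _ hch.1 hch.2.1)))
          have hstep := (pv_pair_step (hirr _ _ hch.2.1) hzns).1
          obtain ⟨tl, htl⟩ := pv_level_head z r'
          rw [htl, List.isChain_cons_cons]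
          refine ⟨?_, ?_⟩
          · rw [hsib_eq]
            exact hsh _ _ hch.2.1 hstep
          · rw [← htl]; exact ih hch.2.2
  | case4 x y rest2 hne ih =>
      intro hch
      rw [List.isChain_cons_cons] at hch
      have hstep := (pv_pair_step (hirr _ _ hch.1) hne).1
      show List.IsChain R (pvALevel (x :: y :: rest2)).1
      rw [show (pvALevel (x :: y :: rest2)).1
          = x >>> (1:Nat) :: (pvALevel (y :: rest2)).1 by simp [pvALevel, hne]]
      obtain ⟨tl, htl⟩ := pv_level_head y rest2
      rw [htl, List.isChain_cons_cons]
      refine ⟨hsh _ _ hch.1 hstep, ?_⟩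
      rw [← htl]; exact ih hch.2

-- the pair sum telescopes through one level
theorem pv_ps_level (R : Int → Int → Prop) (htr : ∀ a b c : Int, R a b → R b c → R a c)
    (hirr : ∀ a b : Int, R a b → a ≠ b) :
    ∀ c : List Int, List.IsChain R c → ∀ hh : Int, 1 ≤ hh →
    pvPS hh (pvALevel c).1 = pvPS (hh + 1) c - pvPS 1 c := by
  intro c
  induction c using pvALevel.induct with
  | case1 => intro _ hh _; simp [pvALevel, pvPS]
  | case2 x => intro _ hh _; simp [pvALevel, pvPS]
  | case3 x rest2 ih =>
      intro hch hh hhh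
      rw [List.isChain_cons_cons] at hch
      obtain ⟨hsib_eq, hg⟩ := pv_pair_sib (x := x) (y := PySem.Int.bxor x 1) rfl
      have hgx1 : pvG 1 x (PySem.Int.bxor x 1) = -1 := hg 1 (by norm_num)
      have hgxh : pvG (hh + 1) x (PySem.Int.bxor x 1) = -1 := hg (hh + 1) (by omega)
      rw [show (pvALevel (x :: PySem.Int.bxor x 1 :: rest2)).1
          = x >>> (1:Nat) :: (pvALevel rest2).1 by simp [pvALevel]]
      cases rest2 with
      | nil =>
          show pvPS hh [x >>> (1:Nat)] = pvPS (hh+1) [x, _] - pvPS 1 [x, _]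
          simp [pvPS, hgx1, hgxh]
      | cons z r' =>
          rw [List.isChain_cons_cons] at hch
          have hzns := pv_not_sib_of_gt (Ne.symm (hirr _ _ (htr _ _ _ hch.1 hch.2.1)))
          obtain ⟨hlt', hg1, hstep⟩ := pv_pair_step (hirr _ _ hch.2.1) hzns
          obtain ⟨tl, htl⟩ := pv_level_head z r'
          rw [htl]
          show pvG hh (x >>> (1:Nat)) (z >>> (1:Nat)) + pvPS hh (z >>> (1:Nat) :: tl) = _
          rw [← htl, ih hch.2.2 hh hhh, hsib_eq, hstep hh]
          show _ = (pvG (hh+1) x (PySem.Int.bxor x 1) + (pvG (hh+1) (PySem.Int.bxor x 1) z + pvPS (hh+1) (z :: r')))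
            - (pvG 1 x (PySem.Int.bxor x 1) + (pvG 1 (PySem.Int.bxor x 1) z + pvPS 1 (z :: r')))
          rw [hgx1, hgxh]
          ring
  | case4 x y rest2 hne ih =>
      intro hch hh hhh
      rw [List.isChain_cons_cons] at hch
      obtain ⟨hlt', hg1, hstep⟩ := pv_pair_step (hirr _ _ hch.1) hne
      rw [show (pvALevel (x :: y :: rest2)).1
          = x >>> (1:Nat) :: (pvALevel (y :: rest2)).1 by simp [pvALevel, hne]]
      obtain ⟨tl, htl⟩ := pv_level_head y rest2
      rw [htl]
      show pvG hh (x >>> (1:Nat)) (y >>> (1:Nat)) + pvPS hh (y >>> (1:Nat) :: tl) = _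
      rw [← htl, ih hch.2 hh hhh, hstep hh]
      show _ = (pvG (hh+1) x y + pvPS (hh+1) (y :: rest2)) - (pvG 1 x y + pvPS 1 (y :: rest2))
      ring

-- the summed levels of A, as a recursion on the number of levels
def pvLoop : List Int → Nat → Int
  | _, 0 => 0
  | c, k+1 => (pvALevel c).2 + pvLoop (pvALevel c).1 k

theorem pv_foldl_loop : ∀ (l : List Int) (c : List Int) (acc : Int),
    ((l.foldl (fun st _ => let lc := pvALevel st.1; (lc.1, st.2 + lc.2)) (c, acc)).2)
      = acc + pvLoop c l.length := by
  intro l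
  induction l with
  | nil => intro c acc; simp [pvLoop]
  | cons e l ih =>
      intro c acc
      simp only [List.foldl_cons, List.length_cons, pvLoop]
      rw [ih]
      ring

theorem pv_pyRange_len (h : Int) : (PySem.List.pyRange 0 h 1).length = h.toNat := by
  simp only [PySem.List.pyRange]
  split_ifs with h1 h2 <;> simp <;> omega

theorem pv_A_eq_loop (si : List Int) (h : Int) :
    octopus_auth_nodes_count si h = pvLoop si h.toNat := by
  unfold octopus_auth_nodes_count
  rw [pv_foldl_loop, pv_pyRange_len]
  simp

-- the closed form for A's loop on strictly increasing input
theorem pv_main (R : Int → Int → Prop) (htr : ∀ a b c : Int, R a b → R b c → R a c)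
    (hirr : ∀ a b : Int, R a b → a ≠ b)
    (hsh : ∀ a b : Int, R a b → a >>> (1:Nat) ≠ b >>> (1:Nat) → R (a >>> (1:Nat)) (b >>> (1:Nat))) :
    ∀ (k : Nat) (c : List Int), List.IsChain R c →
    pvLoop c k = if c = [] ∨ k = 0 then 0 else ((k : Nat) : Int) + pvPS ((k : Nat) : Int) c := by
  intro k
  induction k with
  | zero => intro c _; simp [pvLoop]
  | succ k ih =>
      intro c hch
      rcases eq_or_ne c [] with rfl | hc
      · have h0 : ∀ m, pvLoop ([] : List Int) m = 0 := by
          intro m; induction m with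
          | zero => rfl
          | succ m ihm =>
              show (pvALevel []).2 + pvLoop (pvALevel []).1 m = 0
              simpa [pvALevel] using ihm
        simp [h0]
      · show (pvALevel c).2 + pvLoop (pvALevel c).1 k = _
        rw [if_neg (by simp [hc])]
        rw [ih _ (pv_level_sorted R htr hirr hsh c hch)]
        rw [pv_count_eq R htr hirr c hch hc]
        rcases Nat.eq_zero_or_pos k with rfl | hk
        · simp
        · have hnx : (pvALevel c).1 ≠ [] := by
            obtain ⟨x, r, rfl⟩ : ∃ x r, c = x :: r := by
              cases c with
              | nil => exact absurd rfl hc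
              | cons x r => exact ⟨x, r, rfl⟩
            obtain ⟨tl, htl⟩ := pv_level_head x r
            simp [htl]
          have hcond : ¬ ((pvALevel c).1 = [] ∨ k = 0) := by
            rintro (h | h)
            · exact hnx h
            · omega
          rw [if_neg hcond]
          rw [pv_ps_level R htr hirr c hch (k : Int) (by exact_mod_cast hk)]
          push_cast
          ring

-- ===== VERDICT =====
theorem pv_shift_strict_lt : ∀ a b : Int, a < b → a >>> (1:Nat) ≠ b >>> (1:Nat) →
    a >>> (1:Nat) < b >>> (1:Nat) := by
  intro a b hab hne
  have := pv_shift_mono hab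
  omega

theorem pv_shift_strict_gt : ∀ a b : Int, a > b → a >>> (1:Nat) ≠ b >>> (1:Nat) →
    a >>> (1:Nat) > b >>> (1:Nat) := by
  intro a b hab hne
  have := pv_shift_mono hab
  omega

theorem octopus_auth_nodes_count_spec : Claim_equal_octopus_auth_nodes_count := by
  intro si h _ hpre
  unfold Spec_octopus_auth_nodes_count octopus_auth_nodes_count_alt
  rw [pv_A_eq_loop]
  by_cases hh : h ≤ 0
  · have h0 : ∀ c : List Int, pvLoop c 0 = 0 := fun c => rfl
    rw [(by omega : h.toNat = 0), h0, if_pos (Or.inl hh)]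
  · have hmain : pvLoop si h.toNat = if si = [] ∨ h.toNat = 0 then 0
        else ((h.toNat : Nat) : Int) + pvPS ((h.toNat : Nat) : Int) si := by
      rcases hpre with hpre | hpre | hpre
      · omega
      · exact pv_main (· < ·) (fun _ _ _ => lt_trans) (fun _ _ hab => ne_of_lt hab)
          pv_shift_strict_lt h.toNat si hpre
      · exact pv_main (· > ·) (fun _ _ _ h1 h2 => lt_trans h2 h1) (fun _ _ hab => ne_of_gt hab)
          pv_shift_strict_gt h.toNat si hpre
    rw [hmain, pv_fold_ps]
    rcases eq_or_ne si [] with rfl | hsi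
    · simp
    · have hc1 : ¬ (si = [] ∨ h.toNat = 0) := by
        rintro (hx | hx)
        · exact hsi hx
        · omega
      have hc2 : ¬ (h ≤ 0 ∨ si = []) := by
        rintro (hx | hx)
        · omega
        · exact hsi hx
      rw [if_neg hc1, if_neg hc2, Int.toNat_of_nonneg (by omega)]
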